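-- pv_equiv track=rewrite | github.com/andersblberg/Master | plastic-id-ml/thesis_tools/bracecheck.py | find_unmatched
-- ===== SOURCE A (Python) =====
-- def find_unmatched(text: str):
--     stack, issues = [], []
--     for ln, raw in enumerate(text.splitlines(), 1):
--         line = raw.split("%", 1)[0]  # drop comments
--         i = 0
--         while i < len(line):
--             if line[i] == "\\":  # skip escapes like \{
--                 i += 2
--             elif line[i] == "{":
--                 stack.append((ln, i + 1))
--                 i += 1
--             elif line[i] == "}":
--                 if stack:
--                     stack.pop()
--                 else:
--                     issues.append((ln, i + 1, "extra ‘}’"))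
--                 i += 1
--             else:
--                 i += 1
--
--     issues.extend((ln, col, "missing ‘}’") for ln, col in stack)
--     return issues
-- ===== SOURCE B (Python) =====
-- def find_unmatched(text: str):
--     # Pass 1: tokenize the whole text into a flat list of brace tokens.
--     tokens = []
--     for ln, raw in enumerate(text.splitlines(), 1):
--         line = raw.split("%", 1)[0]  # drop comments
--         skip = False
--         for i, ch in enumerate(line):
--             if skip:
--                 skip = False
--             elif ch == "\\":
--                 skip = True
--             elif ch == "{" or ch == "}":
--                 tokens.append((ln, i + 1, ch))
--     # Pass 2: match the tokens with a stack.
--     stack, issues = [], []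
--     for ln, col, ch in tokens:
--         if ch == "{":
--             stack.append((ln, col))
--         elif stack:
--             stack.pop()
--         else:
--             issues.append((ln, col, "extra ‘}’"))
--     issues.extend((ln, col, "missing ‘}’") for ln, col in stack)
--     return issues
-- ===== Notes on version B (the rewrite author's own statement) =====
-- stated objective: alternative
-- what changed: A's single stateful scan (index-jumping while-loop mutating the stack and issues as it reads each line) is re-decomposed into two passes: a flag-based for-loop tokenizer that builds a flat list of brace tokens with their 1-based positions, then a separate stack matcher over that token list; iterating characters directly instead of A's per-index len()/indexing while-loop gives a constant-factor speedup.
import Mathlib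
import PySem

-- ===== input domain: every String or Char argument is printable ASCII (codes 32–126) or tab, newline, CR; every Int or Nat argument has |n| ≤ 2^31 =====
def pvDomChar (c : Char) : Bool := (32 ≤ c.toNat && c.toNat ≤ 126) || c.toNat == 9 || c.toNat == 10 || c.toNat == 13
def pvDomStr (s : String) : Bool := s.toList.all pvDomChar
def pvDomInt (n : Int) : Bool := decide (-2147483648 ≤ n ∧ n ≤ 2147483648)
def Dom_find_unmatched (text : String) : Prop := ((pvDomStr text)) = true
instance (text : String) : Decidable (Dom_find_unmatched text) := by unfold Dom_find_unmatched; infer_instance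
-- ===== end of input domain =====

-- B re-decomposes A's single stateful scan into two passes (a flag-based tokenizer producing a
-- flat brace-token list, then a stack matcher over the tokens); same return value, measured constant-factor faster.

-- ===== PORT A =====
-- A's inner while-loop: index i jumps by 2 on '\', stack appends/pops at the END (Python list).
def aLoop (ln : Int) (cs : List Char) (i : Nat)
    (stack : List (Int × Int)) (issues : List (Int × Int × String)) :
    List (Int × Int) × List (Int × Int × String) :=
  if h : i < cs.length then
    if cs[i] = '\\' then aLoop ln cs (i + 2) stack issues
    else if cs[i] = '{' then aLoop ln cs (i + 1) (stack ++ [(ln, (i : Int) + 1)]) issues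
    else if cs[i] = '}' then
      if stack ≠ [] then aLoop ln cs (i + 1) stack.dropLast issues
      else aLoop ln cs (i + 1) stack (issues ++ [(ln, (i : Int) + 1, "extra ‘}’")])
    else aLoop ln cs (i + 1) stack issues
  else (stack, issues)
termination_by cs.length - i

def find_unmatched (text : String) : List (Int × Int × String) :=
  let res := (PySem.List.enumerate (PySem.Str.splitlines text) 1).foldl
    (fun (st : List (Int × Int) × List (Int × Int × String)) p =>
      aLoop p.1 (((PySem.Str.splitMax? p.2 "%" 1).getD []).headD "").toList 0 st.1 st.2)
    ([], [])
  res.2 ++ res.1.map (fun q => (q.1, q.2, "missing ‘}’"))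

-- ===== PORT B =====
-- B's pass 1: for-loop over enumerate(cs) with a skip flag for escapes, collecting brace tokens.
def scanStep (ln : Int) (st : Bool × List (Int × Int × Char)) (p : Int × Char) :
    Bool × List (Int × Int × Char) :=
  if st.1 then (false, st.2)
  else if p.2 = '\\' then (true, st.2)
  else if p.2 = '{' ∨ p.2 = '}' then (false, st.2 ++ [(ln, p.1 + 1, p.2)])
  else (false, st.2)

def lineTokens (ln : Int) (cs : List Char) : List (Int × Int × Char) :=
  ((PySem.List.enumerate cs 0).foldl (scanStep ln) (false, [])).2

-- B's pass 2: one step of the stack matcher over a token.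
def matchStep (st : List (Int × Int) × List (Int × Int × String)) (t : Int × Int × Char) :
    List (Int × Int) × List (Int × Int × String) :=
  if t.2.2 = '{' then (st.1 ++ [(t.1, t.2.1)], st.2)
  else if st.1 ≠ [] then (st.1.dropLast, st.2)
  else (st.1, st.2 ++ [(t.1, t.2.1, "extra ‘}’")])

def find_unmatched_alt (text : String) : List (Int × Int × String) :=
  let tokens := (PySem.List.enumerate (PySem.Str.splitlines text) 1).foldl
    (fun acc p => acc ++ lineTokens p.1 (((PySem.Str.splitMax? p.2 "%" 1).getD []).headD "").toList) []
  let res := tokens.foldl matchStep ([], [])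
  res.2 ++ res.1.map (fun q => (q.1, q.2, "missing ‘}’"))

-- ===== PRECONDITION & SPEC =====
def Spec_find_unmatched (text : String) (out : List (Int × Int × String)) : Prop := out = find_unmatched_alt text
instance (text : String) (out : List (Int × Int × String)) : Decidable (Spec_find_unmatched text out) := by unfold Spec_find_unmatched; infer_instance

-- ===== CLAIM (what is proved, stated in full; the proofs are below) =====
def Claim_equal_find_unmatched : Prop := ∀ (text : String), Dom_find_unmatched text → Spec_find_unmatched text (find_unmatched text)

-- ===== LEMMAS AND PROOFS =====

-- Proof-only helper: the brace tokens A's while-loop would visit from index i.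
def toksFrom (ln : Int) (cs : List Char) (i : Nat) : List (Int × Int × Char) :=
  if h : i < cs.length then
    if cs[i] = '\\' then toksFrom ln cs (i + 2)
    else if cs[i] = '{' then (ln, (i : Int) + 1, '{') :: toksFrom ln cs (i + 1)
    else if cs[i] = '}' then (ln, (i : Int) + 1, '}') :: toksFrom ln cs (i + 1)
    else toksFrom ln cs (i + 1)
  else []
termination_by cs.length - i

-- A's loop = folding B's matcher over the tokens the loop visits.
theorem aLoop_eq_fold (ln : Int) (cs : List Char) (i : Nat)
    (stack : List (Int × Int)) (issues : List (Int × Int × String)) :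
    aLoop ln cs i stack issues = (toksFrom ln cs i).foldl matchStep (stack, issues) := by
  induction i, stack, issues using aLoop.induct ln cs with
  | case1 i stack issues h hc ih => rw [aLoop, toksFrom]; simp [h, hc, ih]
  | case2 i stack issues h hc1 hc2 ih =>
      rw [aLoop, toksFrom]; simp [h, hc2, matchStep, ih]
  | case3 i stack issues h hc1 hc2 hne huh ih =>
      rw [aLoop, toksFrom]; simp [h, hne, huh, matchStep, ih]
  | case4 i stack issues h hc1 hc2 hne huh ih =>
      rw [aLoop, toksFrom]; simp [h, hne, huh, matchStep, ih]
  | case5 i stack issues h hc1 hc2 hc3 ih =>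
      rw [aLoop, toksFrom]; simp [h, hc1, hc2, hc3, ih]
  | case6 i stack issues h => rw [aLoop, toksFrom]; simp [h]

-- B's flag-based scanner from position i = the tokens from i (flag set = skip one char).
theorem scan_from (ln : Int) (cs : List Char) (i : Nat) (b : Bool)
    (acc : List (Int × Int × Char)) :
    ((PySem.List.enumerate (cs.drop i) (i : Int)).foldl (scanStep ln) (b, acc)).2
      = acc ++ toksFrom ln cs (if b then i + 1 else i) := by
  induction hn : cs.length - i using Nat.strong_induction_on generalizing i b acc with
  | _ n ih =>
  by_cases h : i < cs.length
  · have hdrop : cs.drop i = cs[i] :: cs.drop (i + 1) := List.drop_eq_getElem_cons h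
    have hcast : ((i : Int) + 1) = ((i + 1 : Nat) : Int) := by push_cast; ring
    rw [hdrop, PySem.List.enumerate_cons, List.foldl_cons]
    cases b with
    | true =>
      have hs : scanStep ln (true, acc) ((i : Int), cs[i]) = (false, acc) := by simp [scanStep]
      rw [hs, hcast, ih (cs.length - (i + 1)) (by omega) (i + 1) false acc rfl]
      simp
    | false =>
      by_cases hb : cs[i] = '\\'
      · have hs : scanStep ln (false, acc) ((i : Int), cs[i]) = (true, acc) := by
          simp [scanStep, hb]
        rw [hs, hcast, ih (cs.length - (i + 1)) (by omega) (i + 1) true acc rfl]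
        conv_rhs => rw [toksFrom]
        simp [h, hb]
      · by_cases ho : cs[i] = '{'
        · have hs : scanStep ln (false, acc) ((i : Int), cs[i])
              = (false, acc ++ [(ln, (i : Int) + 1, cs[i])]) := by simp [scanStep, ho]
          rw [hs, hcast, ih (cs.length - (i + 1)) (by omega) (i + 1) false _ rfl]
          conv_rhs => rw [toksFrom]
          simp [h, ho]
        · by_cases hcl : cs[i] = '}'
          · have hs : scanStep ln (false, acc) ((i : Int), cs[i])
                = (false, acc ++ [(ln, (i : Int) + 1, cs[i])]) := by simp [scanStep, hcl]
            rw [hs, hcast, ih (cs.length - (i + 1)) (by omega) (i + 1) false _ rfl]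
            conv_rhs => rw [toksFrom]
            simp [h, hcl]
          · have hs : scanStep ln (false, acc) ((i : Int), cs[i]) = (false, acc) := by
              simp [scanStep, hb, ho, hcl]
            rw [hs, hcast, ih (cs.length - (i + 1)) (by omega) (i + 1) false acc rfl]
            conv_rhs => rw [toksFrom]
            simp [h, hb, ho, hcl]
  · have hd : cs.drop i = [] := List.drop_eq_nil_iff.mpr (by omega)
    have h2 : ¬ i + 1 < cs.length := by omega
    rw [hd]
    cases b <;> simp [PySem.List.enumerate, toksFrom, h, h2]

theorem lineTokens_eq (ln : Int) (cs : List Char) :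
    lineTokens ln cs = toksFrom ln cs 0 := by
  simpa [lineTokens] using scan_from ln cs 0 false []

-- Folding A's per-line step over the lines = folding the matcher over all the tokens.
theorem lines_fold (L : List (Int × String))
    (st : List (Int × Int) × List (Int × Int × String)) :
    L.foldl (fun st p =>
        aLoop p.1 (((PySem.Str.splitMax? p.2 "%" 1).getD []).headD "").toList 0 st.1 st.2) st
      = (L.flatMap (fun p =>
          lineTokens p.1 (((PySem.Str.splitMax? p.2 "%" 1).getD []).headD "").toList)).foldl
          matchStep st := by
  induction L generalizing st with
  | nil => simp
  | cons p L ih =>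
    simp only [List.foldl_cons, List.flatMap_cons, List.foldl_append]
    rw [ih, aLoop_eq_fold, lineTokens_eq]

-- ===== VERDICT (by name: the statement is the Claim_ definition above) =====
theorem find_unmatched_spec : Claim_equal_find_unmatched := by
  intro text _
  unfold Spec_find_unmatched find_unmatched find_unmatched_alt
  rw [PySem.List.foldl_append_eq_flatMap, lines_fold]
  simp
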